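-- pv_equiv track=rewrite | github.com/ishandutta2007/codeforces | keshi/normal/1105/A.py | check
-- ===== SOURCE A (Python) =====
-- def check(a,x):
--     f=0
--     for i in a:
--         if i>x:
--             f+=i-x-1
--         elif i<x:
--             f+=x-i-1
--     return f
-- ===== SOURCE B (Python) =====
-- def check(a, x):
--     cnt = {}
--     for i in a:
--         cnt[i] = cnt.get(i, 0) + 1
--     total = 0
--     for v, c in cnt.items():
--         if v != x:
--             total += (abs(v - x) - 1) * c
--     return total
-- ===== Notes on version B (the rewrite author's own statement) =====
-- stated objective: alternative
-- what changed: B first groups the list into a value->count dictionary and then sums (|v-x|-1)*count over the distinct values v != x, instead of A's per-element branching accumulator.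
import Mathlib
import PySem

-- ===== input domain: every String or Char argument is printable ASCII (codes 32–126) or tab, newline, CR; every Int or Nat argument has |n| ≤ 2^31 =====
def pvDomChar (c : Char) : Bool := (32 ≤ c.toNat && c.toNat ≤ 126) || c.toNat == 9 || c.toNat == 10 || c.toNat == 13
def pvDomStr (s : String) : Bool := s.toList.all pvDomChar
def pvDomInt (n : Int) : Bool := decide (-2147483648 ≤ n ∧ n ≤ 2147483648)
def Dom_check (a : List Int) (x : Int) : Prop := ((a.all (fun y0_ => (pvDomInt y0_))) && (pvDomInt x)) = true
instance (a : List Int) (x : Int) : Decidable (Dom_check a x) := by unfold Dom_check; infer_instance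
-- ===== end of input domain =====

-- B groups the list into a value→count dictionary and sums (|v-x|-1)*count over the distinct values v ≠ x, instead of A's per-element branching accumulator; same O(n) cost.


-- ===== PORT A =====
def check (a : List Int) (x : Int) : Int :=
  a.foldl (fun f i =>
    if i > x then f + (i - x - 1)
    else if i < x then f + (x - i - 1)
    else f) 0

-- ===== PORT B =====
def check_alt (a : List Int) (x : Int) : Int :=
  let cnt : PySem.Dict Int Int :=
    a.foldl (fun cnt i => cnt.insert i (cnt.getD i 0 + 1)) PySem.Dict.empty
  cnt.items.foldl (fun total p =>
    if p.1 ≠ x then total + (|p.1 - x| - 1) * p.2 else total) 0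

-- ===== PRECONDITION & SPEC =====
def Spec_check (a : List Int) (x : Int) (out : Int) : Prop := out = check_alt a x
instance (a : List Int) (x : Int) (out : Int) : Decidable (Spec_check a x out) := by unfold Spec_check; infer_instance

-- ===== CLAIM (what is proved, stated in full; the proofs are below) =====
def Claim_equal_check : Prop := ∀ (a : List Int) (x : Int), Dom_check a x → Spec_check a x (check a x)

-- ===== LEMMAS AND PROOFS =====

-- the per-element contribution both programs total up
def contrib (x i : Int) : Int := if i ≠ x then |i - x| - 1 else 0

lemma check_shift (a : List Int) (x f : Int) :
    a.foldl (fun f i =>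
      if i > x then f + (i - x - 1)
      else if i < x then f + (x - i - 1)
      else f) f
    = f + (a.map (contrib x)).sum := by
  induction a generalizing f with
  | nil => simp
  | cons h t ih =>
    simp only [List.foldl_cons, List.map_cons, List.sum_cons, ih, contrib]
    rcases lt_trichotomy h x with hlt | heq | hgt
    · rw [if_neg (by omega), if_pos hlt, if_pos (by omega), abs_of_neg (by omega)]; ring
    · rw [if_neg (by omega), if_neg (by omega), if_neg (by simp [heq])]; ring
    · rw [if_pos hgt, if_pos (by omega), abs_of_nonneg (by omega)]; ring

lemma alt_shift (x t0 : Int) (l : List (Int × Int)) :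
    l.foldl (fun total p =>
      if p.1 ≠ x then total + (|p.1 - x| - 1) * p.2 else total) t0
    = t0 + (l.map (fun p => contrib x p.1 * p.2)).sum := by
  induction l generalizing t0 with
  | nil => simp
  | cons h t ih =>
    simp only [List.foldl_cons, List.map_cons, List.sum_cons, ih, contrib]
    by_cases hx : h.1 ≠ x
    · rw [if_pos hx, if_pos hx]; ring
    · rw [if_neg hx, if_neg hx]; ring

-- summing g k·(one indicator) over a nodup list containing h picks out g h
lemma sum_indicator_nodup (g : Int → Int) (s : List Int) (h : Int)
    (hnd : s.Nodup) (hmem : h ∈ s) :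
    (s.map (fun k => g k * (if k = h then (1 : Int) else 0))).sum = g h := by
  induction s with
  | nil => cases hmem
  | cons y t ih =>
    simp only [List.map_cons, List.sum_cons]
    rcases List.mem_cons.mp hmem with rfl | hmt
    · have : (t.map (fun k => g k * (if k = h then (1 : Int) else 0))).sum = 0 := by
        apply List.sum_eq_zero
        intro z hz
        obtain ⟨k, hk, rfl⟩ := List.mem_map.mp hz
        have : k ≠ h := fun e => (List.nodup_cons.mp hnd).1 (e ▸ hk)
        simp [this]
      rw [this]
      simp
    · have hyh : y ≠ h := fun e => (List.nodup_cons.mp hnd).1 (e ▸ hmt)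
      rw [ih (List.nodup_cons.mp hnd).2 hmt]
      simp [hyh]

-- weighted sum over the distinct values with multiplicities = plain sum over the list
lemma weighted_count_sum (g : Int → Int) (a s : List Int)
    (hnd : s.Nodup) (hsub : ∀ i ∈ a, i ∈ s) :
    (s.map (fun k => g k * (a.count k : Int))).sum = (a.map g).sum := by
  induction a with
  | nil => simp
  | cons h t ih =>
    have step : ∀ k : Int, ((h :: t).count k : Int)
        = (t.count k : Int) + (if k = h then 1 else 0) := by
      intro k
      by_cases hk : k = h
      · simp [hk]
      · rw [List.count_cons_of_ne (Ne.symm hk)]; simp [hk]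
    calc (s.map (fun k => g k * ((h :: t).count k : Int))).sum
        = (s.map (fun k => g k * (t.count k : Int)
            + g k * (if k = h then (1:Int) else 0))).sum := by
          apply congrArg
          apply List.map_congr_left
          intro k _
          rw [step k]; ring
      _ = (s.map (fun k => g k * (t.count k : Int))).sum
            + (s.map (fun k => g k * (if k = h then (1:Int) else 0))).sum := by
          rw [← List.sum_map_add]
      _ = (t.map g).sum + g h := by
          rw [ih (fun i hi => hsub i (List.mem_cons_of_mem _ hi)),
              sum_indicator_nodup g s h hnd (hsub h (List.mem_cons_self))]
      _ = ((h :: t).map g).sum := by simp [List.map_cons]; ring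

-- ===== VERDICT (by name: the statement is the Claim_ definition above) =====
theorem check_spec : Claim_equal_check := by
  intro a x _
  unfold Spec_check check check_alt
  have hc : (a.foldl (fun cnt i => cnt.insert i (cnt.getD i 0 + 1))
      (PySem.Dict.empty : PySem.Dict Int Int)) = PySem.Dict.counter a := by
    rw [PySem.Dict.counter_eq_foldl]; rfl
  rw [hc, alt_shift, check_shift, PySem.Dict.items_counter]
  rw [List.map_map]
  have : ((PySem.Set.ofList a).map
      (fun k => contrib x k * (a.count k : Int))).sum = (a.map (contrib x)).sum :=
    weighted_count_sum (contrib x) a (PySem.Set.ofList a)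
      (PySem.Set.nodup_ofList a) (fun i hi => (PySem.Set.mem_ofList a i).mpr hi)
  simpa [Function.comp] using this.symm
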